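-- pv_equiv track=rewrite | github.com/vllm-project/vllm | vllm/spec_decode/batch_expansion.py | _get_token_ids_to_score
-- ===== SOURCE A (Python) =====
-- from typing import Iterator, List, Optional, Tuple
--
-- TokenId = int
--
-- def _get_token_ids_to_score(
--     full_spec_token_ids: List[TokenId]  # shape: [k]
-- ) -> List[List[TokenId]]:
--     """Given an int tensor of proposal token ids, return a list of
--     token ids that should be scored.
--
--     Returns k+1 output lists. The additional one is used for generating the
--     bonus token.
--
--     Example:
--         Input: [0, 1, 2, 3] (k=4)
--         Output: (k+1 lists)
--             []
--             [0]
--             [0, 1]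
--             [0, 1, 2]
--             [0, 1, 2, 3]
--     """
--     empty_token_ids: List[TokenId] = []
--
--     token_ids_to_score = [empty_token_ids]
--     token_ids_to_score.extend(full_spec_token_ids[:i + 1]
--                               for i in range(len(full_spec_token_ids)))
--     return token_ids_to_score
-- ===== SOURCE B (Python) =====
-- from typing import List
--
-- TokenId = int
--
-- def _get_token_ids_to_score(
--     full_spec_token_ids: List[TokenId]  # shape: [k]
-- ) -> List[List[TokenId]]:
--     # Single pass maintaining a growing prefix accumulator instead of
--     # re-slicing the source list for each index.
--     result: List[List[TokenId]] = [[]]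
--     acc: List[TokenId] = []
--     for tok in full_spec_token_ids:
--         acc.append(tok)
--         result.append(list(acc))
--     return result
-- ===== Notes on version B (the rewrite author's own statement) =====
-- stated objective: alternative
-- what changed: Replaces the per-index slicing comprehension (each prefix rebuilt by full_spec_token_ids[:i+1]) with a single pass that grows one accumulator prefix and snapshots it after each token.
import Mathlib
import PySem

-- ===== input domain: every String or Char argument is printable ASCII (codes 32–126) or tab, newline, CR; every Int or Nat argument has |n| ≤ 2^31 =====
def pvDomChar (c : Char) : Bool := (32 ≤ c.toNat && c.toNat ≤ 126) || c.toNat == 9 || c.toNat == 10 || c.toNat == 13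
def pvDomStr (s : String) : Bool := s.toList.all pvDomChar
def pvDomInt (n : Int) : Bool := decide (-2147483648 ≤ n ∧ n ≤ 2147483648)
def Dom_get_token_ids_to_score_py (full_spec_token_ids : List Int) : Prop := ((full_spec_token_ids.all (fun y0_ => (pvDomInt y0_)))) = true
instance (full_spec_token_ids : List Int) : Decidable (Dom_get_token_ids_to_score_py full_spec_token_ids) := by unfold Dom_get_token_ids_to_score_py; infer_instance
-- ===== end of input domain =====

-- B builds the prefixes in one pass with a growing accumulator instead of re-slicing the source per index (objective: alternative decomposition).

-- ===== PORT A =====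
def get_token_ids_to_score_py (full_spec_token_ids : List Int) : List (List Int) :=
  let empty_token_ids : List Int := []
  let token_ids_to_score : List (List Int) := [empty_token_ids]
  token_ids_to_score ++
    (PySem.List.pyRange 0 (full_spec_token_ids.length : Int) 1).map
      (fun i => PySem.List.slice full_spec_token_ids none (some (i + 1)))

-- ===== PORT B =====
def get_token_ids_to_score_alt_loop (toks acc : List Int) (result : List (List Int)) : List (List Int) :=
  match toks with
  | [] => result
  | t :: rest => get_token_ids_to_score_alt_loop rest (acc ++ [t]) (result ++ [acc ++ [t]])

def get_token_ids_to_score_py_alt (full_spec_token_ids : List Int) : List (List Int) :=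
  get_token_ids_to_score_alt_loop full_spec_token_ids [] [[]]

-- ===== PRECONDITION & SPEC =====
def Spec_get_token_ids_to_score_py (full_spec_token_ids : List Int) (out : List (List Int)) : Prop := out = get_token_ids_to_score_py_alt full_spec_token_ids
instance (full_spec_token_ids : List Int) (out : List (List Int)) : Decidable (Spec_get_token_ids_to_score_py full_spec_token_ids out) := by unfold Spec_get_token_ids_to_score_py; infer_instance

-- ===== CLAIM (what is proved, stated in full; the proofs are below) =====
def Claim_equal_get_token_ids_to_score_py : Prop := ∀ (full_spec_token_ids : List Int), Dom_get_token_ids_to_score_py full_spec_token_ids → Spec_get_token_ids_to_score_py full_spec_token_ids (get_token_ids_to_score_py full_spec_token_ids)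

-- ===== LEMMAS AND PROOFS =====

-- the loop of B produces: result ++ one prefix (acc extended by the first i+1 tokens) per index i
theorem alt_loop_eq (toks : List Int) : ∀ (acc : List Int) (result : List (List Int)),
    get_token_ids_to_score_alt_loop toks acc result
      = result ++ (List.range toks.length).map (fun i => acc ++ toks.take (i + 1)) := by
  induction toks with
  | nil => intro acc result; simp [get_token_ids_to_score_alt_loop]
  | cons t rest ih =>
    intro acc result
    rw [get_token_ids_to_score_alt_loop, ih]
    simp [List.range_succ_eq_map, List.append_assoc, Function.comp]

-- ===== VERDICT (by name: the statement is the Claim_ definition above) =====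
theorem get_token_ids_to_score_py_spec : Claim_equal_get_token_ids_to_score_py := by
  intro xs _
  unfold Spec_get_token_ids_to_score_py get_token_ids_to_score_py get_token_ids_to_score_py_alt
  rw [alt_loop_eq]
  rw [PySem.List.pyRange_one]
  simp only [Int.sub_zero, Int.toNat_natCast, List.map_map]
  congr 1
  apply List.map_congr_left
  intro k _
  show PySem.List.slice xs none (some (0 + (k:Int) + 1)) = [] ++ List.take (k + 1) xs
  rw [show (0 : Int) + (k : Int) + 1 = ((k + 1 : Nat) : Int) by push_cast; ring,
    PySem.List.slice_to_natCast]
  simp
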